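-- pv_equiv track=rewrite | github.com/shiro47/matura-informatyka | czerwiec 2021/zadanie 4.py | zadanie_4_1
-- ===== SOURCE A (Python) =====
-- def zadanie_4_1(file):
--     numbers = ("0", "1", "2", "3", "4", "5", "6", "7", "8", "9")
--     result = 0
--     for element in file:
--         for chara in element:
--             if chara in numbers:
--                 result += 1
--     return result
-- ===== SOURCE B (Python) =====
-- def zadanie_4_1(file):
--     return sum(line.count(d) for line in file for d in "0123456789")
-- ===== Notes on version B (the rewrite author's own statement) =====
-- stated objective: idiomatic
-- what changed: Replaces A's explicit nested loops with a membership test and a running counter by a single sum() of ten targeted str.count scans per line.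
import Mathlib
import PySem

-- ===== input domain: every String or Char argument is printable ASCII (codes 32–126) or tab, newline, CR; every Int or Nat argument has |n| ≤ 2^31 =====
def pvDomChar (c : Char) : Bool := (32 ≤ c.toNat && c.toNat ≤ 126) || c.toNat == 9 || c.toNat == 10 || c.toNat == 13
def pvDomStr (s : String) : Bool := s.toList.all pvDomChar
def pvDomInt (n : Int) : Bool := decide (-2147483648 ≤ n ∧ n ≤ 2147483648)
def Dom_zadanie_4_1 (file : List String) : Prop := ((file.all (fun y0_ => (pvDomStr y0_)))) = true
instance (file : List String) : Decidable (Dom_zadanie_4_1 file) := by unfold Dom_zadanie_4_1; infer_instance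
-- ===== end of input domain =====

-- B replaces A's char-by-char membership loop by summing ten str.count scans (more idiomatic; same cost).

-- ===== PORT A =====
-- for element in file: for chara in element: if chara in numbers: result += 1
def zadanie_4_1 (file : List String) : Int :=
  let numbers : List Char := ['0','1','2','3','4','5','6','7','8','9']
  file.foldl
    (fun result element =>
      element.toList.foldl
        (fun r chara => if chara ∈ numbers then r + 1 else r) result)
    0

-- ===== PORT B =====
-- sum(line.count(d) for line in file for d in "0123456789")
def zadanie_4_1_alt (file : List String) : Int :=
  (file.flatMap (fun line =>
      "0123456789".toList.map (fun d => (PySem.Str.count line (String.ofList [d]) : Int)))).sum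

-- ===== PRECONDITION & SPEC =====
def Spec_zadanie_4_1 (file : List String) (out : Int) : Prop := out = zadanie_4_1_alt file
instance (file : List String) (out : Int) : Decidable (Spec_zadanie_4_1 file out) := by unfold Spec_zadanie_4_1; infer_instance

-- ===== CLAIM (what is proved, stated in full; the proofs are below) =====
def Claim_equal_zadanie_4_1 : Prop := ∀ (file : List String), Dom_zadanie_4_1 file → Spec_zadanie_4_1 file (zadanie_4_1 file)

-- ===== LEMMAS AND PROOFS =====

-- str.count with a one-character needle counts occurrences of that character
theorem count_go_singleton (c : Char) : ∀ (l : List Char) (fuel acc : Nat),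
    l.length ≤ fuel → PySem.Chars.count.go [c] fuel l acc = acc + l.count c := by
  intro l
  induction l with
  | nil =>
    intro fuel acc _
    cases fuel <;> simp [PySem.Chars.count.go]
  | cons h t ih =>
    intro fuel acc hf
    cases fuel with
    | zero => simp at hf
    | succ n =>
      by_cases hc : c = h
      · subst hc
        have h1 : PySem.Chars.count.go [c] (n+1) (c::t) acc
            = PySem.Chars.count.go [c] n t (acc+1) := by
          simp [PySem.Chars.count.go, List.isPrefixOf]
        rw [h1, ih n (acc+1) (by simpa using hf)]
        simp
        omega
      · have h1 : PySem.Chars.count.go [c] (n+1) (h::t) acc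
            = PySem.Chars.count.go [c] n t acc := by
          simp [PySem.Chars.count.go, List.isPrefixOf, hc]
        rw [h1, ih n acc (by simpa using hf)]
        simp [Ne.symm hc]

theorem chars_count_singleton (l : List Char) (c : Char) :
    PySem.Chars.count l [c] = l.count c := by
  rw [PySem.Chars.count]
  exact (count_go_singleton c l l.length 0 le_rfl).trans (by omega)

theorem str_count_singleton (line : String) (c : Char) :
    PySem.Str.count line (String.ofList [c]) = line.toList.count c := by
  rw [PySem.Str.count_eq]
  have h : (String.ofList [c]).toList = [c] := Eq.symm ((fun {l} {s} => String.ofList_eq.mp) rfl)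
  rw [h, chars_count_singleton]

-- split countP over a cons of the digit list (digits pairwise distinct)
theorem countP_mem_cons (d : Char) (ds : List Char) (hd : d ∉ ds) (l : List Char) :
    l.countP (fun c => decide (c ∈ d :: ds)) =
      l.count d + l.countP (fun c => decide (c ∈ ds)) := by
  induction l with
  | nil => simp
  | cons h t ih =>
    simp only [List.countP_cons, List.count_cons, ih]
    by_cases hc : h = d
    · subst hc
      simp [hd]
      omega
    · by_cases hm : h ∈ ds <;> simp [hc, hm] <;> omega

theorem sum_counts_eq_countP (ds : List Char) (hnd : ds.Nodup) (l : List Char) :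
    (ds.map (fun d => l.count d)).sum = l.countP (fun c => decide (c ∈ ds)) := by
  induction ds with
  | nil => simp
  | cons d ds ih =>
    rw [List.nodup_cons] at hnd
    rw [List.map_cons, List.sum_cons, ih hnd.2, countP_mem_cons d ds hnd.1 l]

-- per-line: A's inner loop equals B's ten counts
theorem per_line (line : String) (r : Int) :
    line.toList.foldl
        (fun r chara => if chara ∈ ['0','1','2','3','4','5','6','7','8','9'] then r + 1 else r) r
      = r + ("0123456789".toList.map
          (fun d => (PySem.Str.count line (String.ofList [d]) : Int))).sum := by
  rw [PySem.List.foldl_ite_add_one]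
  have h1 : ("0123456789".toList.map
      (fun d => (PySem.Str.count line (String.ofList [d]) : Int))).sum
      = (("0123456789".toList.map (fun d => line.toList.count d)).sum : Nat) := by
    simp only [str_count_singleton]
    induction "0123456789".toList with
    | nil => simp
    | cons a l ih => simp [ih]
  rw [h1, sum_counts_eq_countP _ (by decide)]
  have hds : "0123456789".toList = ['0','1','2','3','4','5','6','7','8','9'] := by decide
  rw [hds]

theorem fold_eq (file : List String) (r : Int) :
    file.foldl
        (fun result element =>
          element.toList.foldl
            (fun r chara => if chara ∈ ['0','1','2','3','4','5','6','7','8','9'] then r + 1 else r)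
            result) r
      = r + (file.flatMap (fun line =>
          "0123456789".toList.map (fun d => (PySem.Str.count line (String.ofList [d]) : Int)))).sum := by
  induction file generalizing r with
  | nil => simp
  | cons line rest ih =>
    rw [List.foldl_cons, ih, per_line, List.flatMap_cons, List.sum_append]
    ring

-- ===== VERDICT (by name: the statement is the Claim_ definition above) =====
theorem zadanie_4_1_spec : Claim_equal_zadanie_4_1 := by
  intro file _
  unfold Spec_zadanie_4_1 zadanie_4_1 zadanie_4_1_alt
  simpa using fold_eq file 0
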